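-- pv_equiv track=rewrite | github.com/ClaytonSdS/StudyControl | grid.py | graph_bar_acertos_erros_functionFinder
-- ===== SOURCE A (Python) =====
-- def SearchByData(lista, string):
-- 	step18 = []
-- 	for i in range(len(lista)):
-- 		step18.append([])
--
-- 	for y in range(len(step18)):
-- 		for x in range(len(lista[y])):
-- 			step18[y].append(lista[y][x])
--
-- 	step19 = []
--
-- 	for w in range(len(step18)):
-- 		if step18[w][0] == str(string):
-- 			step19.append(step18[w])
--
-- 	for w in range(len(step19)):
-- 		step19[w] = tuple(step19[w])
--
-- 	return step19
--
-- def graph_bar_acertos_erros_functionFinder(data, day):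
-- 	DataSearched = SearchByData(data, str(day))
-- 	exercicios_only = []
-- 	acertos_and_erros = {'acertos': [], 'erros': []}
-- 	for y in range(len(DataSearched)):
-- 		if DataSearched[y][2] == 'Exercicios':
-- 			exercicios_only.append(DataSearched[y])
--
-- 	for erros in range(len(exercicios_only)):
-- 		acertos_and_erros['acertos'].append(int(exercicios_only[erros][7]))
-- 		acertos_and_erros['erros'].append(int(exercicios_only[erros][8]))
--
-- 	result_to_plot = {"Acertos": sum(acertos_and_erros['acertos']), "Erros": sum(acertos_and_erros['erros'])}
--
-- 	return result_to_plot
-- ===== SOURCE B (Python) =====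
-- def graph_bar_acertos_erros_functionFinder(data, day):
--     d = str(day)
--     acertos = 0
--     erros = 0
--     for row in data:
--         if row[0] == d and row[2] == 'Exercicios':
--             acertos += int(row[7])
--             erros += int(row[8])
--     return {"Acertos": acertos, "Erros": erros}
-- ===== Notes on version B (the rewrite author's own statement) =====
-- stated objective: simpler
-- what changed: Replaces the SearchByData copy/filter/tuple pipeline and the two intermediate lists that are summed afterwards with a single accumulating pass over data that adds int(row[7]) and int(row[8]) directly to two running totals.
import Mathlib
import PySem

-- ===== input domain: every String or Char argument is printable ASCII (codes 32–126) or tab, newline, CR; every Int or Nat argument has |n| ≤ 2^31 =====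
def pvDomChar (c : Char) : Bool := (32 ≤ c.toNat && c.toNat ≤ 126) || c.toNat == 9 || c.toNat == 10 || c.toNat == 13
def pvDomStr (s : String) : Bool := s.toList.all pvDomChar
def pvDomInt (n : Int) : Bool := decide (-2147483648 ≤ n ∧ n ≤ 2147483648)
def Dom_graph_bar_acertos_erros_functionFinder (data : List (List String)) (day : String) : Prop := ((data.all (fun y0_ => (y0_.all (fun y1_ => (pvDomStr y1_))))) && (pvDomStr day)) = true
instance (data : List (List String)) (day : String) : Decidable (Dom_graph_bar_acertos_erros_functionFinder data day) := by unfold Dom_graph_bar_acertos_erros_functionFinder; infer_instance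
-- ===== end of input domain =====

-- B replaces A's multi-stage copy/filter/tuple pipeline with one accumulating pass (objective: simpler).


-- ===== PORT A =====
-- SearchByData: copy every row element by element, keep rows whose first cell equals string,
-- then turn each kept row into a tuple (a tuple of strings stays a List String here).
def pvSearchByData (lista : List (List String)) (string : String) : List (List String) :=
  let step18 := lista.map (fun row => row.foldl (fun acc x => acc ++ [x]) [])
  let step19 := step18.foldl (fun acc w =>
      if PySem.List.pyGetD w 0 "" = string then acc ++ [w] else acc) []
  step19

def graph_bar_acertos_erros_functionFinder (data : List (List String)) (day : String) : List (String × Int) :=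
  let DataSearched := pvSearchByData data day
  let exercicios_only := DataSearched.foldl (fun acc y =>
      if PySem.List.pyGetD y 2 "" = "Exercicios" then acc ++ [y] else acc) []
  let ae := exercicios_only.foldl (fun (acc : List Int × List Int) row =>
      (acc.1 ++ [(PySem.Int.ofStr? (PySem.List.pyGetD row 7 "")).getD 0],
       acc.2 ++ [(PySem.Int.ofStr? (PySem.List.pyGetD row 8 "")).getD 0])) ([], [])
  [("Acertos", ae.1.sum), ("Erros", ae.2.sum)]

-- ===== PORT B =====
def graph_bar_acertos_erros_functionFinder_alt (data : List (List String)) (day : String) : List (String × Int) :=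
  let ae := data.foldl (fun (acc : Int × Int) row =>
      if PySem.List.pyGetD row 0 "" = day ∧ PySem.List.pyGetD row 2 "" = "Exercicios" then
        (acc.1 + (PySem.Int.ofStr? (PySem.List.pyGetD row 7 "")).getD 0,
         acc.2 + (PySem.Int.ofStr? (PySem.List.pyGetD row 8 "")).getD 0)
      else acc) (0, 0)
  [("Acertos", ae.1), ("Erros", ae.2)]

-- ===== PRECONDITION & SPEC =====
-- Pre_ excludes exactly the inputs where Python A raises: an empty row (IndexError on row[0]),
-- a day-matching row shorter than 3 (IndexError on row[2]), and a matching 'Exercicios' row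
-- shorter than 9 or whose columns 7/8 are not int()-parseable (IndexError/ValueError).
def Pre_graph_bar_acertos_erros_functionFinder (data : List (List String)) (day : String) : Prop :=
  data.all (fun row =>
    !row.isEmpty &&
    (PySem.List.pyGetD row 0 "" != day ||
      (decide (3 ≤ row.length) &&
        (PySem.List.pyGetD row 2 "" != "Exercicios" ||
          (decide (9 ≤ row.length) &&
            (PySem.Int.ofStr? (PySem.List.pyGetD row 7 "")).isSome &&
            (PySem.Int.ofStr? (PySem.List.pyGetD row 8 "")).isSome))))) = true
instance (data : List (List String)) (day : String) : Decidable (Pre_graph_bar_acertos_erros_functionFinder data day) := by unfold Pre_graph_bar_acertos_erros_functionFinder; infer_instance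

def pvWitness_graph_bar_acertos_erros_functionFinder : List (List String) × String :=
  ([["1", "x", "Exercicios", "a", "b", "c", "d", "7", "8"], ["2", "y", "Other"]], "1")

def Spec_graph_bar_acertos_erros_functionFinder (data : List (List String)) (day : String) (out : List (String × Int)) : Prop := out = graph_bar_acertos_erros_functionFinder_alt data day
instance (data : List (List String)) (day : String) (out : List (String × Int)) : Decidable (Spec_graph_bar_acertos_erros_functionFinder data day out) := by unfold Spec_graph_bar_acertos_erros_functionFinder; infer_instance

-- ===== CLAIM (what is proved, stated in full; the proofs are below) =====
def Claim_equal_graph_bar_acertos_erros_functionFinder : Prop := ∀ (data : List (List String)) (day : String), Dom_graph_bar_acertos_erros_functionFinder data day → Pre_graph_bar_acertos_erros_functionFinder data day → Spec_graph_bar_acertos_erros_functionFinder data day (graph_bar_acertos_erros_functionFinder data day)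

-- ===== LEMMAS AND PROOFS =====

-- the element-by-element copy of a row is the row itself
theorem pv_copy_id (row : List String) :
    row.foldl (fun acc x => acc ++ [x]) ([] : List String) = row := by
  have h : ∀ (l acc : List String), l.foldl (fun acc x => acc ++ [x]) acc = acc ++ l := by
    intro l
    induction l with
    | nil => simp [List.foldl]
    | cons h t ih => intro acc; simp [List.foldl, ih]
  simpa using h row []

-- an append-if fold is a filter
theorem pv_fold_filter (p : List String → Prop) [DecidablePred p]
    (l acc : List (List String)) :
    l.foldl (fun acc w => if p w then acc ++ [w] else acc) acc
      = acc ++ l.filter (fun w => decide (p w)) := by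
  induction l generalizing acc with
  | nil => simp [List.foldl]
  | cons h t ih =>
    by_cases hp : p h <;> simp [List.foldl, hp, ih]

-- the two-list accumulation is a pair of maps
theorem pv_fold_pair (f g : List String → Int) (l : List (List String))
    (a b : List Int) :
    l.foldl (fun (acc : List Int × List Int) row => (acc.1 ++ [f row], acc.2 ++ [g row])) (a, b)
      = (a ++ l.map f, b ++ l.map g) := by
  induction l generalizing a b with
  | nil => simp [List.foldl]
  | cons h t ih => simp [List.foldl, ih]

-- B's single fold computes the sums over the doubly-filtered list
theorem pv_alt_fold (day : String) (f g : List String → Int) (l : List (List String))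
    (a b : Int) :
    l.foldl (fun (acc : Int × Int) row =>
        if PySem.List.pyGetD row 0 "" = day ∧ PySem.List.pyGetD row 2 "" = "Exercicios" then
          (acc.1 + f row, acc.2 + g row)
        else acc) (a, b)
      = (a + (((l.filter (fun w => decide (PySem.List.pyGetD w 0 "" = day))).filter
                (fun w => decide (PySem.List.pyGetD w 2 "" = "Exercicios"))).map f).sum,
         b + (((l.filter (fun w => decide (PySem.List.pyGetD w 0 "" = day))).filter
                (fun w => decide (PySem.List.pyGetD w 2 "" = "Exercicios"))).map g).sum) := by
  induction l generalizing a b with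
  | nil => simp [List.foldl]
  | cons h t ih =>
    by_cases h0 : PySem.List.pyGetD h 0 "" = day <;>
      by_cases h2 : PySem.List.pyGetD h 2 "" = "Exercicios" <;>
        simp [List.foldl, h0, h2, ih, add_assoc]

-- ===== VERDICT (by name: the statement is the Claim_ definition above) =====
theorem graph_bar_acertos_erros_functionFinder_spec : Claim_equal_graph_bar_acertos_erros_functionFinder := by
  intro data day _ _
  unfold Spec_graph_bar_acertos_erros_functionFinder
  unfold graph_bar_acertos_erros_functionFinder graph_bar_acertos_erros_functionFinder_alt pvSearchByData
  simp only [pv_copy_id, List.map_id',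
    pv_fold_filter (fun w => PySem.List.pyGetD w 0 "" = day),
    pv_fold_filter (fun w => PySem.List.pyGetD w 2 "" = "Exercicios"),
    pv_fold_pair, pv_alt_fold, List.nil_append, zero_add]
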